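-- pv_equiv track=rewrite | github.com/alumno709600/Pr-ctica-1.2_Palabra_Dia | wordle_funciones.py | comprobar_intento
-- ===== SOURCE A (Python) =====
-- def comprobar_intento(palabra_secreta: str, intento: str) -> list[str]:
--     """
--     Compara el intento con la palabra secreta y devuelve una lista indicando
--     para cada letra si es:
--         - "verde" -> letra correcta y en la posición correcta
--         - "amarillo" -> letra presente en otra posición
--         - "gris" -> letra no presente
--     """
--     palabra_secreta = palabra_secreta.upper()
--     intento = intento.upper()
--
--     resultado = ["gris"] * len(intento)
--     letras_restantes = list(palabra_secreta)
--
--     # Primero marcamos los verdes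
--     for i in range(len(intento)):
--         if intento[i] == palabra_secreta[i]:
--             resultado[i] = "verde"
--             letras_restantes[i] = None  # quitamos la letra usada
--
--     # Luego marcamos los amarillos
--     for i in range(len(intento)):
--         if resultado[i] == "gris" and intento[i] in letras_restantes:
--             resultado[i] = "amarillo"
--             letras_restantes[letras_restantes.index(intento[i])] = None
--
--     return resultado
-- ===== SOURCE B (Python) =====
-- def comprobar_intento(palabra_secreta: str, intento: str) -> list[str]:
--     """Stateless closed form: no leftover-letter pool. A position is 'verde' when
--     the letters match; otherwise it is 'amarillo' exactly when its rank among the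
--     non-green occurrences of its letter is below that letter's spare count in the
--     secret (occurrences in the secret not used up by greens), else 'gris'."""
--     secreta = palabra_secreta.upper()
--     intento = intento.upper()
--     n = len(intento)
--
--     def color(i):
--         if intento[i] == secreta[i]:
--             return "verde"
--         c = intento[i]
--         quota = secreta.count(c) - sum(
--             1 for j in range(n) if intento[j] == secreta[j] and intento[j] == c)
--         rank = sum(1 for j in range(i) if intento[j] != secreta[j] and intento[j] == c)
--         return "amarillo" if rank < quota else "gris"
--
--     return [color(i) for i in range(n)]
-- ===== Notes on version B (the rewrite author's own statement) =====
-- stated objective: alternative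
-- what changed: A keeps a mutable leftover-letters list and consumes it left to right (membership + .index + blanking); B keeps no state at all and computes each position's colour by a closed-form rank-vs-quota test: a non-green position is 'amarillo' iff the number of earlier non-green occurrences of its letter is below the secret's count of that letter minus its greens.
import Mathlib
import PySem

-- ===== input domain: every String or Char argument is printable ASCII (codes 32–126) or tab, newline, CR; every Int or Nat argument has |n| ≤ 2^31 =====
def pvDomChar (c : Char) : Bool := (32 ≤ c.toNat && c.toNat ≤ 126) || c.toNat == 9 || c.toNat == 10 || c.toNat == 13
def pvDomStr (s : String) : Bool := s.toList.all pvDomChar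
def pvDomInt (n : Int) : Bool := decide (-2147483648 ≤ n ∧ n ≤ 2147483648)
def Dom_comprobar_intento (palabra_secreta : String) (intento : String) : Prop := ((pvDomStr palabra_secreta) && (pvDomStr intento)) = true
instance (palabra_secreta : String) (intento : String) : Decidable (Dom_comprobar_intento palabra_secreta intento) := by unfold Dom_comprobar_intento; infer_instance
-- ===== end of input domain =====

-- B replaces A's mutable leftover-letters pool by a stateless per-position closed-form
-- rank-vs-quota test (objective: alternative decomposition, not claimed faster).

-- ===== PORT A =====
-- A's first loop: mark greens, blank the used secret letter.
-- `none` from s[i]? is exactly Python's IndexError (excluded by Pre_).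
def pvAGreen (s g : List Char) : List Nat → List String → List (Option Char) → List String × List (Option Char)
  | [], res, letras => (res, letras)
  | i :: is, res, letras =>
    match s[i]? with
    | none => (res, letras)   -- Python raises IndexError here; outside Pre_
    | some sc =>
      if g.getD i ' ' = sc then pvAGreen s g is (res.set i "verde") (letras.set i none)
      else pvAGreen s g is res letras

-- A's second loop: turn "gris" into "amarillo" while the letter is still in letras_restantes,
-- blanking the first occurrence found by .index (in-range reads written with getD).
def pvAYellow (g : List Char) : List Nat → List String → List (Option Char) → List String
  | [], res, _ => res
  | i :: is, res, letras =>
    if res.getD i "" = "gris" ∧ letras.contains (some (g.getD i ' ')) then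
      pvAYellow g is (res.set i "amarillo")
        (letras.set ((PySem.List.index? letras (some (g.getD i ' '))).getD 0) none)
    else pvAYellow g is res letras

def comprobar_intento (palabra_secreta : String) (intento : String) : List String :=
  let s := PySem.Chars.upper palabra_secreta.toList
  let g := PySem.Chars.upper intento.toList
  let p := pvAGreen s g (List.range g.length) (List.replicate g.length "gris") (s.map some)
  pvAYellow g (List.range g.length) p.1 p.2

-- ===== PORT B =====
-- B's quota: secret count of c minus the number of green positions carrying c.
def pvQuota (s g : List Char) (c : Char) : Int :=
  (s.count c : Int) -
    ((List.range g.length).countP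
      (fun j => (g.getD j ' ' == s.getD j ' ') && (g.getD j ' ' == c)) : Int)

-- B's rank: non-green occurrences of c among the first k guess positions.
def pvRank (s g : List Char) (k : Nat) (c : Char) : Int :=
  ((List.range k).countP
    (fun j => !(g.getD j ' ' == s.getD j ' ') && (g.getD j ' ' == c)) : Int)

-- Source B's color(i): verde on a match, else amarillo iff rank < quota (in-range reads as getD).
def pvBColor (s g : List Char) (i : Nat) : String :=
  if g.getD i ' ' = s.getD i ' ' then "verde"
  else if pvRank s g i (g.getD i ' ') < pvQuota s g (g.getD i ' ') then "amarillo"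
  else "gris"

def comprobar_intento_alt (palabra_secreta : String) (intento : String) : List String :=
  let s := PySem.Chars.upper palabra_secreta.toList
  let g := PySem.Chars.upper intento.toList
  (List.range g.length).map (pvBColor s g)

-- ===== PRECONDITION & SPEC =====
-- Pre_ excludes exactly the inputs where A raises IndexError: intento longer than palabra_secreta.
def Pre_comprobar_intento (palabra_secreta : String) (intento : String) : Prop :=
  intento.toList.length ≤ palabra_secreta.toList.length
instance (palabra_secreta : String) (intento : String) : Decidable (Pre_comprobar_intento palabra_secreta intento) := by unfold Pre_comprobar_intento; infer_instance
def pvWitness_comprobar_intento : String × String := ("CASAS", "SACO")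

def Spec_comprobar_intento (palabra_secreta : String) (intento : String) (out : List String) : Prop := out = comprobar_intento_alt palabra_secreta intento
instance (palabra_secreta : String) (intento : String) (out : List String) : Decidable (Spec_comprobar_intento palabra_secreta intento out) := by unfold Spec_comprobar_intento; infer_instance

-- ===== CLAIM (what is proved, stated in full; the proofs are below) =====
def Claim_equal_comprobar_intento : Prop := ∀ (palabra_secreta : String) (intento : String), Dom_comprobar_intento palabra_secreta intento → Pre_comprobar_intento palabra_secreta intento → Spec_comprobar_intento palabra_secreta intento (comprobar_intento palabra_secreta intento)

-- ===== LEMMAS AND PROOFS =====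

-- counting through a single set: replacing l[j] (= a) by b moves one unit of count from a to b
lemma pv_count_set {α : Type} [BEq α] [LawfulBEq α] (l : List α) (j : Nat) (a b x : α)
    (h : l[j]? = some a) :
    (l.set j b).count x + (if a == x then 1 else 0) = l.count x + (if b == x then 1 else 0) := by
  induction l generalizing j with
  | nil => simp at h
  | cons hd tl ih =>
    cases j with
    | zero =>
      simp only [List.getElem?_cons_zero, Option.some.injEq] at h; subst h
      simp only [List.set_cons_zero, List.count_cons]
      omega
    | succ j =>
      simp only [List.getElem?_cons_succ] at h
      have := ih j h
      simp only [List.set_cons_succ, List.count_cons]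
      omega

-- A's green loop only sets cells; the length never changes
lemma pv_setfold_length (s g : List Char) (v : String) :
    ∀ (is : List Nat) (l : List String),
      (is.foldl (fun r i => if g.getD i ' ' = s.getD i ' ' then r.set i v else r) l).length = l.length := by
  intro is
  induction is with
  | nil => intro l; rfl
  | cons i is ih =>
    intro l
    simp only [List.foldl_cons]
    split_ifs
    · rw [ih, List.length_set]
    · rw [ih]

-- pointwise description of A's green loop on resultado
lemma pv_setfold_getD (s g : List Char) (v d : String) :
    ∀ (is : List Nat) (l : List String) (j : Nat),
      (is.foldl (fun r i => if g.getD i ' ' = s.getD i ' ' then r.set i v else r) l).getD j d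
        = if j ∈ is ∧ g.getD j ' ' = s.getD j ' ' ∧ j < l.length then v else l.getD j d := by
  intro is
  induction is with
  | nil => intro l j; simp
  | cons i t ih =>
    intro l j
    simp only [List.foldl_cons]
    by_cases hpi : g.getD i ' ' = s.getD i ' '
    · rw [if_pos hpi, ih]
      by_cases hjt : j ∈ t ∧ g.getD j ' ' = s.getD j ' ' ∧ j < (l.set i v).length
      · rw [if_pos hjt, if_pos ⟨List.mem_cons_of_mem _ hjt.1, by simpa [List.length_set] using hjt.2⟩]
      · rw [if_neg hjt]
        by_cases hji : j = i
        · subst hji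
          by_cases hlen : j < l.length
          · have : (l.set j v).getD j d = v := by
              simp [List.getD, hlen]
            rw [this, if_pos ⟨List.mem_cons_self, hpi, hlen⟩]
          · rw [List.set_eq_of_length_le (by omega)]
            rw [if_neg (by
              simp [List.length_set] at hjt ⊢
              intro _
              omega)]
        · have : (l.set i v).getD j d = l.getD j d := by
            simp [List.getD, List.getElem?_set_ne (fun h => hji h.symm)]
          rw [this]
          simp only [List.length_set] at hjt
          rw [if_neg (by
            rintro ⟨h1, h2, h3⟩
            rcases List.mem_cons.1 h1 with rfl | h1
            · exact hji rfl
            · exact hjt ⟨h1, h2, h3⟩)]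
    · rw [if_neg hpi, ih]
      have : (j ∈ t ∧ g.getD j ' ' = s.getD j ' ' ∧ j < l.length)
          ↔ (j ∈ i :: t ∧ g.getD j ' ' = s.getD j ' ' ∧ j < l.length) := by
        constructor
        · rintro ⟨h1, h2, h3⟩; exact ⟨List.mem_cons_of_mem _ h1, h2, h3⟩
        · rintro ⟨h1, h2, h3⟩
          rcases List.mem_cons.1 h1 with rfl | h1
          · exact absurd h2 hpi
          · exact ⟨h1, h2, h3⟩
      rw [if_congr this rfl rfl]

-- A's green loop on letras_restantes, counted: each green position removes one copy of its letter
lemma pv_setnone_count (s g : List Char) :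
    ∀ (is : List Nat) (letras : List (Option Char)) (c : Char),
      is.Nodup → (∀ i ∈ is, letras[i]? = some (some (s.getD i ' '))) →
      (is.foldl (fun l i => if g.getD i ' ' = s.getD i ' ' then l.set i none else l) letras).count (some c)
        + is.countP (fun i => (g.getD i ' ' == s.getD i ' ') && (s.getD i ' ' == c))
        = letras.count (some c) := by
  intro is
  induction is with
  | nil => intro letras c _ _; simp
  | cons i t ih =>
    intro letras c hnd hmem
    have hit : i ∉ t := (List.nodup_cons.1 hnd).1
    have hndt : t.Nodup := (List.nodup_cons.1 hnd).2
    simp only [List.foldl_cons, List.countP_cons]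
    by_cases hm : g.getD i ' ' = s.getD i ' '
    · rw [if_pos hm]
      have hmem' : ∀ j ∈ t, (letras.set i none)[j]? = some (some (s.getD j ' ')) := by
        intro j hj
        rw [List.getElem?_set_ne (by rintro rfl; exact hit hj)]
        exact hmem j (List.mem_cons_of_mem _ hj)
      have hcs := pv_count_set letras i (some (s.getD i ' ')) none (some c)
        (hmem i List.mem_cons_self)
      have hrec := ih (letras.set i none) c hndt hmem'
      have hb : (g.getD i ' ' == s.getD i ' ') = true := beq_iff_eq.2 hm
      have h2 : (some (s.getD i ' ') == some c) = (s.getD i ' ' == c) := by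
        cases hsc : (s.getD i ' ' == c) <;> simp_all
      have h3 : (if (none == some c) = true then (1:Nat) else 0) = 0 := by simp
      rw [h2, h3] at hcs
      rw [hb, Bool.true_and]
      omega
    · rw [if_neg hm]
      have hrec := ih letras c hndt (fun j hj => hmem j (List.mem_cons_of_mem _ hj))
      have hb : (g.getD i ' ' == s.getD i ' ') = false := by
        simpa using hm
      rw [hb, Bool.false_and]
      simp only [Bool.false_eq_true, if_false]
      omega

-- A's green recursion, split into two independent cell-setting folds (all indices in range)
lemma pv_green_eq_folds (s g : List Char) (hsg : g.length ≤ s.length) :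
    ∀ (is : List Nat) (res : List String) (letras : List (Option Char)),
      (∀ i ∈ is, i < g.length) →
      pvAGreen s g is res letras =
        (is.foldl (fun r i => if g.getD i ' ' = s.getD i ' ' then r.set i "verde" else r) res,
         is.foldl (fun l i => if g.getD i ' ' = s.getD i ' ' then l.set i none else l) letras) := by
  intro is
  induction is with
  | nil => intro res letras _; rfl
  | cons i t ih =>
    intro res letras hmem
    have hi : i < s.length := lt_of_lt_of_le (hmem i List.mem_cons_self) hsg
    have hs : s[i]? = some s[i] := List.getElem?_eq_getElem hi
    have hsd : s.getD i ' ' = s[i] := by simp [List.getD, hs]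
    simp only [List.foldl_cons]
    rw [pvAGreen, hs]
    simp only [hsd]
    by_cases hm : g.getD i ' ' = s[i]
    · rw [if_pos hm, if_pos hm, if_pos hm]
      exact ih _ _ (fun j hj => hmem j (List.mem_cons_of_mem _ hj))
    · rw [if_neg hm, if_neg hm, if_neg hm]
      exact ih _ _ (fun j hj => hmem j (List.mem_cons_of_mem _ hj))

-- rank recurrences
lemma pv_rank_succ (s g : List Char) (k : Nat) (c : Char) :
    pvRank s g (k+1) c = pvRank s g k c
      + (if !(g.getD k ' ' == s.getD k ' ') && (g.getD k ' ' == c) then 1 else 0) := by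
  unfold pvRank
  rw [List.range_succ, List.countP_append, List.countP_cons, List.countP_nil]
  split_ifs <;> simp_all

-- the heart of the equivalence: A's consuming yellow scan produces exactly B's
-- closed-form rank-vs-quota colours.  Invariant: letras_restantes carries, per
-- letter c, exactly max 0 (quota c - rank k c) copies of c.
lemma pv_yellow_main (s g : List Char) :
    ∀ (m k : Nat) (res : List String) (letras : List (Option Char)),
      res.length = g.length → k + m = g.length →
      (∀ j, k ≤ j → j < g.length →
        res.getD j "" = (if g.getD j ' ' = s.getD j ' ' then "verde" else "gris")) →
      (∀ c : Char, ((letras.count (some c) : Int) = max 0 (pvQuota s g c - pvRank s g k c))) →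
      pvAYellow g (List.range' k m) res letras
        = res.take k ++ (List.range' k m).map (pvBColor s g) := by
  intro m
  induction m with
  | zero =>
    intro k res letras hlen hkm _ _
    simp only [List.range'_zero]
    rw [pvAYellow, List.map_nil, List.append_nil, List.take_of_length_le (by omega)]
  | succ m ih =>
    intro k res letras hlen hkm hres hcnt
    have hk : k < g.length := by omega
    have hkr : k < res.length := by omega
    rw [List.range'_succ, pvAYellow, List.map_cons]
    have hresk := hres k le_rfl hk
    by_cases hgr : g.getD k ' ' = s.getD k ' '
    · -- green position: A skips, B says verde
      rw [if_pos hgr] at hresk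
      rw [if_neg (by rw [hresk]; rintro ⟨h, -⟩; exact absurd h (by decide))]
      have hrk : ∀ c, pvRank s g (k+1) c = pvRank s g k c := by
        intro c
        rw [pv_rank_succ]
        have hb : (g.getD k ' ' == s.getD k ' ') = true := beq_iff_eq.2 hgr
        rw [hb]
        simp
      rw [ih (k+1) res letras hlen (by omega)
        (fun j hj hjl => hres j (by omega) hjl)
        (fun c => by rw [hrk c]; exact hcnt c)]
      rw [List.take_succ_eq_append_getElem (by omega)]
      have hv : res[k] = "verde" := by
        rw [← hresk]; simp [List.getD, List.getElem?_eq_getElem hkr]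
      have hbc : pvBColor s g k = "verde" := by rw [pvBColor, if_pos hgr]
      rw [hv, hbc, List.append_assoc]
      rfl
    · rw [if_neg hgr] at hresk
      set c := g.getD k ' ' with hc
      have hbne : (g.getD k ' ' == s.getD k ' ') = false := by simpa using hgr
      have hcntc := hcnt c
      by_cases hlt : pvRank s g k c < pvQuota s g c
      · -- A marks amarillo and consumes one copy; B says amarillo
        have hcp : 0 < letras.count (some c) := by omega
        have hmemc : some c ∈ letras := List.count_pos_iff.1 hcp
        have hcont : letras.contains (some c) := by simpa using hmemc
        rw [if_pos ⟨hresk, hcont⟩]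
        obtain ⟨j0, hj0⟩ : ∃ j0, PySem.List.index? letras (some c) = some j0 := by
          have := (PySem.List.index?_isSome_iff (xs := letras) (v := some c)).2 hmemc
          exact Option.isSome_iff_exists.1 this
        obtain ⟨hj0l, hj0v, -⟩ := PySem.List.getElem_of_index?_eq_some hj0
        have hj0get : letras[j0]? = some (some c) := by
          rw [List.getElem?_eq_getElem hj0l, hj0v]
        rw [hj0]
        simp only [Option.getD_some]
        have hcnt' : ∀ c' : Char,
            (((letras.set j0 none).count (some c') : Int)
              = max 0 (pvQuota s g c' - pvRank s g (k+1) c')) := by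
          intro c'
          have hcs := pv_count_set letras j0 (some c) none (some c') hj0get
          rw [pv_rank_succ]
          by_cases hcc : c' = c
          · subst hcc
            have h1 : (some c == some c) = true := by simp
            have h2 : ((none : Option Char) == some c) = false := by simp
            rw [h1, h2] at hcs
            simp only [if_true, Bool.false_eq_true, if_false] at hcs
            have hbc : (g.getD k ' ' == c) = true := beq_iff_eq.2 hc.symm
            rw [hbne, hbc]
            simp only [Bool.not_false, Bool.true_and, if_true]
            omega
          · have h1 : (some c == some c') = false := by
              simpa using fun h => hcc h.symm
            have h2 : ((none : Option Char) == some c') = false := by simp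
            rw [h1, h2] at hcs
            simp only [Bool.false_eq_true, if_false] at hcs
            have hbc : (g.getD k ' ' == c') = false := by
              rw [← hc]; simpa using fun h => hcc h.symm
            rw [hbne, hbc]
            simp only [Bool.and_false, Bool.false_eq_true, if_false]
            have := hcnt c'
            omega
        rw [ih (k+1) (res.set k "amarillo") (letras.set j0 none)
          (by simpa using hlen) (by omega)
          (fun j hj hjl => by
            rw [List.getD, List.getElem?_set_ne (by omega)]
            exact hres j (by omega) hjl) hcnt']
        have hbc : pvBColor s g k = "amarillo" := by
          rw [pvBColor, if_neg hgr, if_pos (by rw [← hc]; exact hlt)]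
        have htake : (res.set k "amarillo").take (k+1) = res.take k ++ ["amarillo"] := by
          rw [List.take_succ_eq_append_getElem (by simpa using hkr)]
          rw [List.take_set, List.set_eq_of_length_le (by simp)]
          simp
        rw [htake, hbc, List.append_assoc]
        rfl
      · -- letter exhausted: both say gris
        have h0 : letras.count (some c) = 0 := by omega
        have hnc : letras.contains (some c) = false := by
          have : some c ∉ letras := by rw [← List.count_pos_iff]; omega
          simpa using this
        rw [if_neg (by rintro ⟨-, h⟩; rw [hnc] at h; exact absurd h (by decide))]
        have hcnt' : ∀ c' : Char,
            ((letras.count (some c') : Int) = max 0 (pvQuota s g c' - pvRank s g (k+1) c')) := by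
          intro c'
          rw [pv_rank_succ]
          by_cases hcc : c' = c
          · subst hcc
            have hbc : (g.getD k ' ' == c) = true := beq_iff_eq.2 hc.symm
            rw [hbne, hbc]
            simp only [Bool.not_false, Bool.true_and, if_true]
            omega
          · have hbc : (g.getD k ' ' == c') = false := by
              rw [← hc]; simpa using fun h => hcc h.symm
            rw [hbne, hbc]
            simp only [Bool.and_false, Bool.false_eq_true, if_false]
            exact hcnt c'
        rw [ih (k+1) res letras hlen (by omega)
          (fun j hj hjl => hres j (by omega) hjl) hcnt']
        rw [List.take_succ_eq_append_getElem (by omega)]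
        have hv : res[k] = "gris" := by
          rw [← hresk]; simp [List.getD, List.getElem?_eq_getElem hkr]
        have hbc : pvBColor s g k = "gris" := by
          rw [pvBColor, if_neg hgr, if_neg (by rw [← hc]; exact hlt)]
        rw [hv, hbc, List.append_assoc]
        rfl

-- ===== VERDICT (by name: the statement is the Claim_ definition above) =====
theorem comprobar_intento_spec : Claim_equal_comprobar_intento := by
  intro ps it _ hpre
  unfold Pre_comprobar_intento at hpre
  unfold Spec_comprobar_intento
  simp only [comprobar_intento, comprobar_intento_alt]
  set s := PySem.Chars.upper ps.toList with hsdef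
  set g := PySem.Chars.upper it.toList with hgdef
  have hls : s.length = ps.toList.length := by rw [hsdef]; simp [PySem.Chars.upper]
  have hlg : g.length = it.toList.length := by rw [hgdef]; simp [PySem.Chars.upper]
  have hsg : g.length ≤ s.length := by omega
  rw [pv_green_eq_folds s g hsg (List.range g.length) _ _ (fun i hi => List.mem_range.1 hi)]
  dsimp only
  set R0 := (List.range g.length).foldl
    (fun r i => if g.getD i ' ' = s.getD i ' ' then r.set i "verde" else r)
    (List.replicate g.length "gris") with hR0
  set L0 := (List.range g.length).foldl
    (fun l i => if g.getD i ' ' = s.getD i ' ' then l.set i none else l) (s.map some) with hL0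
  have hR0len : R0.length = g.length := by
    rw [hR0, pv_setfold_length]; simp
  have hres : ∀ j, (0:Nat) ≤ j → j < g.length →
      R0.getD j "" = (if g.getD j ' ' = s.getD j ' ' then "verde" else "gris") := by
    intro j _ hj
    rw [hR0, pv_setfold_getD]
    by_cases hm : g.getD j ' ' = s.getD j ' '
    · rw [if_pos ⟨List.mem_range.2 hj, hm, by simp [hj]⟩, if_pos hm]
    · rw [if_neg (by rintro ⟨-, h, -⟩; exact hm h), if_neg hm]
      exact List.getD_replicate _ hj
  have hcnt : ∀ c : Char, ((L0.count (some c) : Int) = max 0 (pvQuota s g c - pvRank s g 0 c)) := by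
    intro c
    have hA := pv_setnone_count s g (List.range g.length) (s.map some) c List.nodup_range
      (fun i hi => by
        have hi' : i < s.length := by have := List.mem_range.1 hi; omega
        simp [List.getElem?_map, List.getElem?_eq_getElem hi', List.getD])
    have hmap : (s.map some).count (some c) = s.count c :=
      List.count_map_of_injective s some (Option.some_injective _) c
    have hcp : (List.range g.length).countP
          (fun i => (g.getD i ' ' == s.getD i ' ') && (s.getD i ' ' == c))
        = (List.range g.length).countP
          (fun i => (g.getD i ' ' == s.getD i ' ') && (g.getD i ' ' == c)) := by
      apply List.countP_congr
      intro j hj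
      by_cases hm : g.getD j ' ' = s.getD j ' '
      · rw [beq_iff_eq.2 hm, Bool.true_and, Bool.true_and, hm]
      · have hb : (g.getD j ' ' == s.getD j ' ') = false := by simpa using hm
        rw [hb, Bool.false_and, Bool.false_and]
    rw [← hL0, hmap, hcp] at hA
    unfold pvQuota pvRank
    simp only [List.range_zero, List.countP_nil]
    omega
  rw [List.range_eq_range']
  rw [pv_yellow_main s g g.length 0 R0 L0 hR0len (by omega)
    (fun j _ hj => hres j (by omega) hj) hcnt]
  simp [← List.range_eq_range']
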